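-- pv_equiv track=rewrite | github.com/logus2k/tts_server | BACKUP5/bge_api_boundary_detector.py | _check_obvious_incomplete
-- ===== SOURCE A (Python) =====
-- from typing import List, Tuple, Optional, Dict
--
-- def _check_obvious_incomplete(text: str) -> Tuple[bool, str]:
--     """Check for obvious incomplete patterns that BGE-M3 might miss"""
--     text_lower = text.strip().lower()
--
--     # Obvious incomplete endings
--     incomplete_endings = [
--         ' of', ' and', ' the', ' which', ' that', ' where', ' when',
--         ' because', ' since', ' while', ' during', ' through', ' with',
--         ' for', ' from', ' into', ' onto', ' upon', ' about', ' above',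
--         ' below', ' under', ' over', ' between', ' among', ' within',
--         ' without', ' against', ' towards', ' across', ' behind',
--         ' beside', ' beyond', ' beneath', ' inside', ' outside',
--         ' including', ' excluding', ' regarding', ' concerning',
--         ' considering', ' following', ' preceding', ' during',
--         ' throughout', ' underneath', ' alongside', ' amidst'
--     ]
--
--     for ending in incomplete_endings:
--         if text_lower.endswith(ending):
--             return True, f"incomplete_ending_{ending.strip()}"
--
--     # Check for incomplete conjunctions and transitions
--     incomplete_conjunctions = [
--         ' and then', ' but also', ' not only', ' either', ' neither',
--         ' both', ' whether', ' although', ' though', ' unless',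
--         ' whereas', ' whereby', ' wherein', ' whereupon', ' therefore',
--         ' however', ' moreover', ' furthermore', ' nevertheless',
--         ' nonetheless', ' meanwhile', ' consequently', ' accordingly',
--         ' thus', ' hence', ' otherwise', ' instead', ' besides',
--         ' additionally', ' similarly', ' likewise', ' conversely',
--         ' in contrast', ' on the other hand', ' for example',
--         ' for instance', ' such as', ' in particular', ' specifically',
--         ' especially', ' namely', ' that is', ' in other words'
--     ]
--
--     for conjunction in incomplete_conjunctions:
--         if text_lower.endswith(conjunction):
--             return True, f"incomplete_conjunction_{conjunction.strip()}"
--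
--     # Check for incomplete scientific/technical phrases
--     incomplete_technical = [
--         ' theory of', ' principle of', ' law of', ' concept of',
--         ' definition of', ' explanation of', ' description of',
--         ' analysis of', ' study of', ' research on', ' investigation into',
--         ' examination of', ' evaluation of', ' assessment of',
--         ' measurement of', ' calculation of', ' determination of',
--         ' application of', ' implementation of', ' development of',
--         ' creation of', ' formation of', ' construction of',
--         ' production of', ' generation of', ' synthesis of'
--     ]
--
--     for technical in incomplete_technical:
--         if text_lower.endswith(technical):
--             return True, f"incomplete_technical_{technical.strip()}"
--
--     return False, "complete"
-- ===== SOURCE B (Python) =====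
-- from typing import Tuple
--
-- # Precomputed lookup table: the final word of each incomplete-suffix phrase maps
-- # to the ordered (phrase-without-leading-space, full label) pairs sharing it.
-- _INDEX = {
--     'of': [
--         ('of', 'incomplete_ending_of'),
--         ('theory of', 'incomplete_technical_theory of'),
--         ('principle of', 'incomplete_technical_principle of'),
--         ('law of', 'incomplete_technical_law of'),
--         ('concept of', 'incomplete_technical_concept of'),
--         ('definition of', 'incomplete_technical_definition of'),
--         ('explanation of', 'incomplete_technical_explanation of'),
--         ('description of', 'incomplete_technical_description of'),
--         ('analysis of', 'incomplete_technical_analysis of'),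
--         ('study of', 'incomplete_technical_study of'),
--         ('examination of', 'incomplete_technical_examination of'),
--         ('evaluation of', 'incomplete_technical_evaluation of'),
--         ('assessment of', 'incomplete_technical_assessment of'),
--         ('measurement of', 'incomplete_technical_measurement of'),
--         ('calculation of', 'incomplete_technical_calculation of'),
--         ('determination of', 'incomplete_technical_determination of'),
--         ('application of', 'incomplete_technical_application of'),
--         ('implementation of', 'incomplete_technical_implementation of'),
--         ('development of', 'incomplete_technical_development of'),
--         ('creation of', 'incomplete_technical_creation of'),
--         ('formation of', 'incomplete_technical_formation of'),
--         ('construction of', 'incomplete_technical_construction of'),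
--         ('production of', 'incomplete_technical_production of'),
--         ('generation of', 'incomplete_technical_generation of'),
--         ('synthesis of', 'incomplete_technical_synthesis of'),
--     ],
--     'and': [
--         ('and', 'incomplete_ending_and'),
--     ],
--     'the': [
--         ('the', 'incomplete_ending_the'),
--     ],
--     'which': [
--         ('which', 'incomplete_ending_which'),
--     ],
--     'that': [
--         ('that', 'incomplete_ending_that'),
--     ],
--     'where': [
--         ('where', 'incomplete_ending_where'),
--     ],
--     'when': [
--         ('when', 'incomplete_ending_when'),
--     ],
--     'because': [
--         ('because', 'incomplete_ending_because'),
--     ],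
--     'since': [
--         ('since', 'incomplete_ending_since'),
--     ],
--     'while': [
--         ('while', 'incomplete_ending_while'),
--     ],
--     'during': [
--         ('during', 'incomplete_ending_during'),
--         ('during', 'incomplete_ending_during'),
--     ],
--     'through': [
--         ('through', 'incomplete_ending_through'),
--     ],
--     'with': [
--         ('with', 'incomplete_ending_with'),
--     ],
--     'for': [
--         ('for', 'incomplete_ending_for'),
--     ],
--     'from': [
--         ('from', 'incomplete_ending_from'),
--     ],
--     'into': [
--         ('into', 'incomplete_ending_into'),
--         ('investigation into', 'incomplete_technical_investigation into'),
--     ],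
--     'onto': [
--         ('onto', 'incomplete_ending_onto'),
--     ],
--     'upon': [
--         ('upon', 'incomplete_ending_upon'),
--     ],
--     'about': [
--         ('about', 'incomplete_ending_about'),
--     ],
--     'above': [
--         ('above', 'incomplete_ending_above'),
--     ],
--     'below': [
--         ('below', 'incomplete_ending_below'),
--     ],
--     'under': [
--         ('under', 'incomplete_ending_under'),
--     ],
--     'over': [
--         ('over', 'incomplete_ending_over'),
--     ],
--     'between': [
--         ('between', 'incomplete_ending_between'),
--     ],
--     'among': [
--         ('among', 'incomplete_ending_among'),
--     ],
--     'within': [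
--         ('within', 'incomplete_ending_within'),
--     ],
--     'without': [
--         ('without', 'incomplete_ending_without'),
--     ],
--     'against': [
--         ('against', 'incomplete_ending_against'),
--     ],
--     'towards': [
--         ('towards', 'incomplete_ending_towards'),
--     ],
--     'across': [
--         ('across', 'incomplete_ending_across'),
--     ],
--     'behind': [
--         ('behind', 'incomplete_ending_behind'),
--     ],
--     'beside': [
--         ('beside', 'incomplete_ending_beside'),
--     ],
--     'beyond': [
--         ('beyond', 'incomplete_ending_beyond'),
--     ],
--     'beneath': [
--         ('beneath', 'incomplete_ending_beneath'),
--     ],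
--     'inside': [
--         ('inside', 'incomplete_ending_inside'),
--     ],
--     'outside': [
--         ('outside', 'incomplete_ending_outside'),
--     ],
--     'including': [
--         ('including', 'incomplete_ending_including'),
--     ],
--     'excluding': [
--         ('excluding', 'incomplete_ending_excluding'),
--     ],
--     'regarding': [
--         ('regarding', 'incomplete_ending_regarding'),
--     ],
--     'concerning': [
--         ('concerning', 'incomplete_ending_concerning'),
--     ],
--     'considering': [
--         ('considering', 'incomplete_ending_considering'),
--     ],
--     'following': [
--         ('following', 'incomplete_ending_following'),
--     ],
--     'preceding': [
--         ('preceding', 'incomplete_ending_preceding'),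
--     ],
--     'throughout': [
--         ('throughout', 'incomplete_ending_throughout'),
--     ],
--     'underneath': [
--         ('underneath', 'incomplete_ending_underneath'),
--     ],
--     'alongside': [
--         ('alongside', 'incomplete_ending_alongside'),
--     ],
--     'amidst': [
--         ('amidst', 'incomplete_ending_amidst'),
--     ],
--     'then': [
--         ('and then', 'incomplete_conjunction_and then'),
--     ],
--     'also': [
--         ('but also', 'incomplete_conjunction_but also'),
--     ],
--     'only': [
--         ('not only', 'incomplete_conjunction_not only'),
--     ],
--     'either': [
--         ('either', 'incomplete_conjunction_either'),
--     ],
--     'neither': [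
--         ('neither', 'incomplete_conjunction_neither'),
--     ],
--     'both': [
--         ('both', 'incomplete_conjunction_both'),
--     ],
--     'whether': [
--         ('whether', 'incomplete_conjunction_whether'),
--     ],
--     'although': [
--         ('although', 'incomplete_conjunction_although'),
--     ],
--     'though': [
--         ('though', 'incomplete_conjunction_though'),
--     ],
--     'unless': [
--         ('unless', 'incomplete_conjunction_unless'),
--     ],
--     'whereas': [
--         ('whereas', 'incomplete_conjunction_whereas'),
--     ],
--     'whereby': [
--         ('whereby', 'incomplete_conjunction_whereby'),
--     ],
--     'wherein': [
--         ('wherein', 'incomplete_conjunction_wherein'),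
--     ],
--     'whereupon': [
--         ('whereupon', 'incomplete_conjunction_whereupon'),
--     ],
--     'therefore': [
--         ('therefore', 'incomplete_conjunction_therefore'),
--     ],
--     'however': [
--         ('however', 'incomplete_conjunction_however'),
--     ],
--     'moreover': [
--         ('moreover', 'incomplete_conjunction_moreover'),
--     ],
--     'furthermore': [
--         ('furthermore', 'incomplete_conjunction_furthermore'),
--     ],
--     'nevertheless': [
--         ('nevertheless', 'incomplete_conjunction_nevertheless'),
--     ],
--     'nonetheless': [
--         ('nonetheless', 'incomplete_conjunction_nonetheless'),
--     ],
--     'meanwhile': [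
--         ('meanwhile', 'incomplete_conjunction_meanwhile'),
--     ],
--     'consequently': [
--         ('consequently', 'incomplete_conjunction_consequently'),
--     ],
--     'accordingly': [
--         ('accordingly', 'incomplete_conjunction_accordingly'),
--     ],
--     'thus': [
--         ('thus', 'incomplete_conjunction_thus'),
--     ],
--     'hence': [
--         ('hence', 'incomplete_conjunction_hence'),
--     ],
--     'otherwise': [
--         ('otherwise', 'incomplete_conjunction_otherwise'),
--     ],
--     'instead': [
--         ('instead', 'incomplete_conjunction_instead'),
--     ],
--     'besides': [
--         ('besides', 'incomplete_conjunction_besides'),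
--     ],
--     'additionally': [
--         ('additionally', 'incomplete_conjunction_additionally'),
--     ],
--     'similarly': [
--         ('similarly', 'incomplete_conjunction_similarly'),
--     ],
--     'likewise': [
--         ('likewise', 'incomplete_conjunction_likewise'),
--     ],
--     'conversely': [
--         ('conversely', 'incomplete_conjunction_conversely'),
--     ],
--     'contrast': [
--         ('in contrast', 'incomplete_conjunction_in contrast'),
--     ],
--     'hand': [
--         ('on the other hand', 'incomplete_conjunction_on the other hand'),
--     ],
--     'example': [
--         ('for example', 'incomplete_conjunction_for example'),
--     ],
--     'instance': [
--         ('for instance', 'incomplete_conjunction_for instance'),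
--     ],
--     'as': [
--         ('such as', 'incomplete_conjunction_such as'),
--     ],
--     'particular': [
--         ('in particular', 'incomplete_conjunction_in particular'),
--     ],
--     'specifically': [
--         ('specifically', 'incomplete_conjunction_specifically'),
--     ],
--     'especially': [
--         ('especially', 'incomplete_conjunction_especially'),
--     ],
--     'namely': [
--         ('namely', 'incomplete_conjunction_namely'),
--     ],
--     'is': [
--         ('that is', 'incomplete_conjunction_that is'),
--     ],
--     'words': [
--         ('in other words', 'incomplete_conjunction_in other words'),
--     ],
--     'on': [
--         ('research on', 'incomplete_technical_research on'),
--     ],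
-- }
--
-- def _check_obvious_incomplete(text: str) -> Tuple[bool, str]:
--     """Check for obvious incomplete patterns that BGE-M3 might miss"""
--     text_lower = text.strip().lower()
--     words = text_lower.split()
--     if not words:
--         return False, "complete"
--     for phrase, label in _INDEX.get(words[-1], ()):
--         if text_lower.endswith(' ' + phrase):
--             return True, label
--     return False, "complete"
-- ===== Notes on version B (the rewrite author's own statement) =====
-- stated objective: alternative
-- what changed: B replaces A's three sequential endswith loops over ~117 spaced suffixes by a precomputed literal dict mapping each suffix's final word to its ordered (phrase, full label) pairs; at runtime B splits the text once, looks up only the bucket of its last word and endswith-checks that handful of phrases (stored without the leading space, labels prebuilt).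
import Mathlib
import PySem

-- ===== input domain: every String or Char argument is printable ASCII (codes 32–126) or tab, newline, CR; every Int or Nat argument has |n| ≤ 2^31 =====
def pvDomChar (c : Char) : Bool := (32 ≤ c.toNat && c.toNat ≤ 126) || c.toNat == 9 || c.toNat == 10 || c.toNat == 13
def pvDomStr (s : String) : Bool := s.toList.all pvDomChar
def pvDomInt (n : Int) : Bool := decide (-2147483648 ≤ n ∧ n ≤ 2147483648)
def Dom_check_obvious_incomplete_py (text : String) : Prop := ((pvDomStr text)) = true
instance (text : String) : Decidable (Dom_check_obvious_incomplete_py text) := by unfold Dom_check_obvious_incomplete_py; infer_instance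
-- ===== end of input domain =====

-- B replaces A's three sequential endswith loops over ~117 suffixes by a precomputed
-- literal dict keyed by a suffix's final word: at runtime only the bucket of the
-- text's last word is scanned (objective: alternative).

-- ===== PORT A =====
def pvEndings : List String := [
  " of", " and", " the", " which", " that", " where", " when",
  " because", " since", " while", " during", " through", " with",
  " for", " from", " into", " onto", " upon", " about", " above",
  " below", " under", " over", " between", " among", " within",
  " without", " against", " towards", " across", " behind",
  " beside", " beyond", " beneath", " inside", " outside",
  " including", " excluding", " regarding", " concerning",
  " considering", " following", " preceding", " during",
  " throughout", " underneath", " alongside", " amidst"]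

def pvConjunctions : List String := [
  " and then", " but also", " not only", " either", " neither",
  " both", " whether", " although", " though", " unless",
  " whereas", " whereby", " wherein", " whereupon", " therefore",
  " however", " moreover", " furthermore", " nevertheless",
  " nonetheless", " meanwhile", " consequently", " accordingly",
  " thus", " hence", " otherwise", " instead", " besides",
  " additionally", " similarly", " likewise", " conversely",
  " in contrast", " on the other hand", " for example",
  " for instance", " such as", " in particular", " specifically",
  " especially", " namely", " that is", " in other words"]

def pvTechnical : List String := [
  " theory of", " principle of", " law of", " concept of",
  " definition of", " explanation of", " description of",
  " analysis of", " study of", " research on", " investigation into",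
  " examination of", " evaluation of", " assessment of",
  " measurement of", " calculation of", " determination of",
  " application of", " implementation of", " development of",
  " creation of", " formation of", " construction of",
  " production of", " generation of", " synthesis of"]

-- A's for-loop with early return: first suffix s in the list with text.endswith(s)
def pvScanA (t : String) (pre : String) : List String → Option (Bool × String)
  | [] => none
  | s :: rest =>
      if PySem.Str.endswith t s then some (true, pre ++ PySem.Str.strip s)
      else pvScanA t pre rest

def check_obvious_incomplete_py (text : String) : Bool × String :=
  let text_lower := PySem.Str.lower (PySem.Str.strip text)
  match pvScanA text_lower "incomplete_ending_" pvEndings with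
  | some r => r
  | none =>
    match pvScanA text_lower "incomplete_conjunction_" pvConjunctions with
    | some r => r
    | none =>
      match pvScanA text_lower "incomplete_technical_" pvTechnical with
      | some r => r
      | none => (false, "complete")

-- ===== PORT B =====
-- Source B's precomputed literal _INDEX: last word of each suffix phrase ↦ ordered
-- (phrase-without-leading-space, full label) pairs sharing that last word
def pvIndexB : PySem.Dict String (List (String × String)) := PySem.Dict.mk [
  ("of", [("of", "incomplete_ending_of"), ("theory of", "incomplete_technical_theory of"), ("principle of", "incomplete_technical_principle of"), ("law of", "incomplete_technical_law of"), ("concept of", "incomplete_technical_concept of"), ("definition of", "incomplete_technical_definition of"), ("explanation of", "incomplete_technical_explanation of"), ("description of", "incomplete_technical_description of"), ("analysis of", "incomplete_technical_analysis of"), ("study of", "incomplete_technical_study of"), ("examination of", "incomplete_technical_examination of"), ("evaluation of", "incomplete_technical_evaluation of"), ("assessment of", "incomplete_technical_assessment of"), ("measurement of", "incomplete_technical_measurement of"), ("calculation of", "incomplete_technical_calculation of"), ("determination of", "incomplete_technical_determination of"), ("application of", "incomplete_technical_application of"), ("implementation of", "incomplete_technical_implementation of"), ("development of", "incomplete_technical_development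 of"), ("creation of", "incomplete_technical_creation of"), ("formation of", "incomplete_technical_formation of"), ("construction of", "incomplete_technical_construction of"), ("production of", "incomplete_technical_production of"), ("generation of", "incomplete_technical_generation of"), ("synthesis of", "incomplete_technical_synthesis of")]),
  ("and", [("and", "incomplete_ending_and")]),
  ("the", [("the", "incomplete_ending_the")]),
  ("which", [("which", "incomplete_ending_which")]),
  ("that", [("that", "incomplete_ending_that")]),
  ("where", [("where", "incomplete_ending_where")]),
  ("when", [("when", "incomplete_ending_when")]),
  ("because", [("because", "incomplete_ending_because")]),
  ("since", [("since", "incomplete_ending_since")]),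
  ("while", [("while", "incomplete_ending_while")]),
  ("during", [("during", "incomplete_ending_during"), ("during", "incomplete_ending_during")]),
  ("through", [("through", "incomplete_ending_through")]),
  ("with", [("with", "incomplete_ending_with")]),
  ("for", [("for", "incomplete_ending_for")]),
  ("from", [("from", "incomplete_ending_from")]),
  ("into", [("into", "incomplete_ending_into"), ("investigation into", "incomplete_technical_investigation into")]),
  ("onto", [("onto", "incomplete_ending_onto")]),
  ("upon", [("upon", "incomplete_ending_upon")]),
  ("about", [("about", "incomplete_ending_about")]),
  ("above", [("above", "incomplete_ending_above")]),
  ("below", [("below", "incomplete_ending_below")]),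
  ("under", [("under", "incomplete_ending_under")]),
  ("over", [("over", "incomplete_ending_over")]),
  ("between", [("between", "incomplete_ending_between")]),
  ("among", [("among", "incomplete_ending_among")]),
  ("within", [("within", "incomplete_ending_within")]),
  ("without", [("without", "incomplete_ending_without")]),
  ("against", [("against", "incomplete_ending_against")]),
  ("towards", [("towards", "incomplete_ending_towards")]),
  ("across", [("across", "incomplete_ending_across")]),
  ("behind", [("behind", "incomplete_ending_behind")]),
  ("beside", [("beside", "incomplete_ending_beside")]),
  ("beyond", [("beyond", "incomplete_ending_beyond")]),
  ("beneath", [("beneath", "incomplete_ending_beneath")]),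
  ("inside", [("inside", "incomplete_ending_inside")]),
  ("outside", [("outside", "incomplete_ending_outside")]),
  ("including", [("including", "incomplete_ending_including")]),
  ("excluding", [("excluding", "incomplete_ending_excluding")]),
  ("regarding", [("regarding", "incomplete_ending_regarding")]),
  ("concerning", [("concerning", "incomplete_ending_concerning")]),
  ("considering", [("considering", "incomplete_ending_considering")]),
  ("following", [("following", "incomplete_ending_following")]),
  ("preceding", [("preceding", "incomplete_ending_preceding")]),
  ("throughout", [("throughout", "incomplete_ending_throughout")]),
  ("underneath", [("underneath", "incomplete_ending_underneath")]),
  ("alongside", [("alongside", "incomplete_ending_alongside")]),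
  ("amidst", [("amidst", "incomplete_ending_amidst")]),
  ("then", [("and then", "incomplete_conjunction_and then")]),
  ("also", [("but also", "incomplete_conjunction_but also")]),
  ("only", [("not only", "incomplete_conjunction_not only")]),
  ("either", [("either", "incomplete_conjunction_either")]),
  ("neither", [("neither", "incomplete_conjunction_neither")]),
  ("both", [("both", "incomplete_conjunction_both")]),
  ("whether", [("whether", "incomplete_conjunction_whether")]),
  ("although", [("although", "incomplete_conjunction_although")]),
  ("though", [("though", "incomplete_conjunction_though")]),
  ("unless", [("unless", "incomplete_conjunction_unless")]),
  ("whereas", [("whereas", "incomplete_conjunction_whereas")]),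
  ("whereby", [("whereby", "incomplete_conjunction_whereby")]),
  ("wherein", [("wherein", "incomplete_conjunction_wherein")]),
  ("whereupon", [("whereupon", "incomplete_conjunction_whereupon")]),
  ("therefore", [("therefore", "incomplete_conjunction_therefore")]),
  ("however", [("however", "incomplete_conjunction_however")]),
  ("moreover", [("moreover", "incomplete_conjunction_moreover")]),
  ("furthermore", [("furthermore", "incomplete_conjunction_furthermore")]),
  ("nevertheless", [("nevertheless", "incomplete_conjunction_nevertheless")]),
  ("nonetheless", [("nonetheless", "incomplete_conjunction_nonetheless")]),
  ("meanwhile", [("meanwhile", "incomplete_conjunction_meanwhile")]),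
  ("consequently", [("consequently", "incomplete_conjunction_consequently")]),
  ("accordingly", [("accordingly", "incomplete_conjunction_accordingly")]),
  ("thus", [("thus", "incomplete_conjunction_thus")]),
  ("hence", [("hence", "incomplete_conjunction_hence")]),
  ("otherwise", [("otherwise", "incomplete_conjunction_otherwise")]),
  ("instead", [("instead", "incomplete_conjunction_instead")]),
  ("besides", [("besides", "incomplete_conjunction_besides")]),
  ("additionally", [("additionally", "incomplete_conjunction_additionally")]),
  ("similarly", [("similarly", "incomplete_conjunction_similarly")]),
  ("likewise", [("likewise", "incomplete_conjunction_likewise")]),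
  ("conversely", [("conversely", "incomplete_conjunction_conversely")]),
  ("contrast", [("in contrast", "incomplete_conjunction_in contrast")]),
  ("hand", [("on the other hand", "incomplete_conjunction_on the other hand")]),
  ("example", [("for example", "incomplete_conjunction_for example")]),
  ("instance", [("for instance", "incomplete_conjunction_for instance")]),
  ("as", [("such as", "incomplete_conjunction_such as")]),
  ("particular", [("in particular", "incomplete_conjunction_in particular")]),
  ("specifically", [("specifically", "incomplete_conjunction_specifically")]),
  ("especially", [("especially", "incomplete_conjunction_especially")]),
  ("namely", [("namely", "incomplete_conjunction_namely")]),
  ("is", [("that is", "incomplete_conjunction_that is")]),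
  ("words", [("in other words", "incomplete_conjunction_in other words")]),
  ("on", [("research on", "incomplete_technical_research on")])
]
-- Source B's runtime for-loop over a bucket, with early return
def pvLoopB (t : String) : List (String × String) → Bool × String
  | [] => (false, "complete")
  | q :: rest =>
      if PySem.Str.endswith t (" " ++ q.1) then (true, q.2) else pvLoopB t rest

def check_obvious_incomplete_py_alt (text : String) : Bool × String :=
  let text_lower := PySem.Str.lower (PySem.Str.strip text)
  match (PySem.Str.split₀ text_lower).getLast? with
  | none => (false, "complete")                       -- Source B: if not words
  | some w => pvLoopB text_lower (pvIndexB.getD w []) -- _INDEX.get(words[-1], ())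

-- ===== PRECONDITION & SPEC =====
def Spec_check_obvious_incomplete_py (text : String) (out : Bool × String) : Prop := out = check_obvious_incomplete_py_alt text
instance (text : String) (out : Bool × String) : Decidable (Spec_check_obvious_incomplete_py text out) := by unfold Spec_check_obvious_incomplete_py; infer_instance

-- ===== CLAIM (what is proved, stated in full; the proofs are below) =====
def Claim_equal_check_obvious_incomplete_py : Prop := ∀ (text : String), Dom_check_obvious_incomplete_py text → Spec_check_obvious_incomplete_py text (check_obvious_incomplete_py text)

-- ===== LEMMAS AND PROOFS =====

set_option maxRecDepth 10000

-- A's three labelled suffix lists flattened in priority order (proof-side view of A)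
def pvTableA : List (String × String) :=
     pvEndings.map      (fun s => (s, "incomplete_ending_"      ++ PySem.Str.strip s))
  ++ pvConjunctions.map (fun s => (s, "incomplete_conjunction_" ++ PySem.Str.strip s))
  ++ pvTechnical.map    (fun s => (s, "incomplete_technical_"   ++ PySem.Str.strip s))

def pvKeys : List String := ["of", "and", "the", "which", "that", "where", "when", "because", "since", "while", "during", "through", "with", "for", "from", "into", "onto", "upon", "about", "above", "below", "under", "over", "between", "among", "within", "without", "against", "towards", "across", "behind", "beside", "beyond", "beneath", "inside", "outside", "including", "excluding", "regarding", "concerning", "considering", "following", "preceding", "throughout", "underneath", "alongside", "amidst", "then", "also", "only", "either", "neither", "both", "whether", "although", "though", "unless", "whereas", "whereby", "wherein", "whereupon", "therefore", "however", "moreover", "furthermore", "nevertheless", "nonetheless", "meanwhile", "consequently", "accordingly", "thus", "hence", "otherwise", "instead", "besides", "additionally", "similarly", "likewise", "conversely", "contrast", "hand", "example", "instance", "as", "particular", "specifically", "especially", "namely", "is", "words", "on"]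
-- last word of a suffix string
def pvKey (s : String) : String := ((PySem.Str.split₀ s).getLast?).getD ""

-- split₀.go flushes its accumulator in front
theorem pv_go_acc (xs : List Char) (cur : List Char) (acc : List (List Char)) :
    PySem.Chars.split₀.go xs cur acc = acc.reverse ++ PySem.Chars.split₀.go xs cur [] := by
  induction xs generalizing cur acc with
  | nil =>
      simp only [PySem.Chars.split₀.go]
      by_cases h : cur.isEmpty <;> simp [h]
  | cons c rest ih =>
      simp only [PySem.Chars.split₀.go]
      by_cases hs : PySem.Chars.isspace c
      · by_cases h : cur.isEmpty
        · simp only [hs, h, if_true]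
          exact ih [] acc
        · simp only [hs, h, if_true, Bool.false_eq_true, if_false]
          rw [ih [] (cur.reverse :: acc), ih [] [cur.reverse]]
          simp
      · simp only [hs, Bool.false_eq_true, if_false]
        exact ih _ _

-- split₀ splits across a whitespace boundary
theorem pv_go_append (v : List Char) (c : Char) (hc : PySem.Chars.isspace c = true)
    (u : List Char) : ∀ cur : List Char,
    PySem.Chars.split₀.go (u ++ c :: v) cur [] =
      PySem.Chars.split₀.go u cur [] ++ PySem.Chars.split₀.go (c :: v) [] [] := by
  induction u with
  | nil =>
      intro cur
      simp only [List.nil_append]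
      conv_lhs => rw [PySem.Chars.split₀.go]
      conv_rhs => rw [PySem.Chars.split₀.go, PySem.Chars.split₀.go]
      by_cases h : cur.isEmpty
      · simp [hc, h]
      · simp only [hc, h, if_true, Bool.false_eq_true, if_false]
        rw [pv_go_acc v [] [cur.reverse]]
        simp
  | cons d u' ih =>
      intro cur
      simp only [List.cons_append]
      conv_lhs => rw [PySem.Chars.split₀.go]
      conv_rhs => rw [PySem.Chars.split₀.go]
      by_cases hs : PySem.Chars.isspace d
      · by_cases h : cur.isEmpty
        · simp only [hs, h, if_true]
          exact ih []
        · simp only [hs, h, if_true, Bool.false_eq_true, if_false]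
          rw [pv_go_acc (u' ++ c :: v) [] [cur.reverse], pv_go_acc u' [] [cur.reverse], ih []]
          simp
      · simp only [hs, Bool.false_eq_true, if_false]
        exact ih (d :: cur)

theorem pv_split_append (u v : List Char) (c : Char) (hc : PySem.Chars.isspace c = true) :
    PySem.Chars.split₀ (u ++ c :: v) = PySem.Chars.split₀ u ++ PySem.Chars.split₀ (c :: v) := by
  unfold PySem.Chars.split₀
  exact pv_go_append v c hc u []

-- a suffix match fixes the last word of the text
theorem pv_last_eq (t s : String) (hh : s.toList.head? = some ' ')
    (hne : PySem.Chars.split₀ s.toList ≠ [])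
    (hm : PySem.Str.endswith t s = true) :
    (PySem.Str.split₀ t).getLast? = (PySem.Str.split₀ s).getLast? := by
  have hsuf : s.toList <:+ t.toList := by
    rw [PySem.Str.endswith_eq] at hm
    exact (PySem.Chars.endswith_iff _ _).1 hm
  obtain ⟨u, hu⟩ := hsuf
  cases hsl : s.toList with
  | nil => rw [hsl] at hh; simp at hh
  | cons c tail =>
      have hc : c = ' ' := by rw [hsl] at hh; simpa using hh
      subst hc
      have hsp : PySem.Chars.isspace ' ' = true := by decide
      rw [hsl] at hu
      simp only [PySem.Str.split₀]
      rw [← hu, pv_split_append u tail ' ' hsp, List.map_append, ← hsl]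
      rw [List.getLast?_append_of_ne_nil]
      simp only [ne_eq, List.map_eq_nil_iff]
      exact hne

-- each table suffix starts with a space and has at least one word
theorem pv_table_fact : ∀ p ∈ pvTableA,
    p.1.toList.head? = some ' ' ∧ PySem.Chars.split₀ p.1.toList ≠ [] := by decide

-- every table suffix's last word is a key
theorem pv_keys_fact : ∀ p ∈ pvTableA, pvKey p.1 ∈ pvKeys := by decide

-- pvIndexB's keys are exactly pvKeys
theorem pv_index_keys : pvIndexB.keys = pvKeys := by decide

-- for each key, the bucket (with the leading space restored) is exactly the
-- key-filtered slice of A's flattened table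
theorem pv_bucket : ∀ w ∈ pvKeys,
    (pvIndexB.getD w []).map (fun q => ((" " ++ q.1 : String), q.2)) =
      pvTableA.filter (fun p => pvKey p.1 == w) := by decide

-- find? may be restricted to any predicate-closed filter
theorem pv_find?_filter {α : Type} (l : List α) (pred keep : α → Bool)
    (h : ∀ a ∈ l, pred a = true → keep a = true) :
    l.find? pred = (l.filter keep).find? pred := by
  induction l with
  | nil => rfl
  | cons a l ih =>
      by_cases hk : keep a = true
      · by_cases hp : pred a = true
        · simp [hk, hp]
        · simp only [List.filter_cons, hk, if_true, List.find?_cons, hp]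
          simp only [Bool.not_eq_true] at hp
          simp [ih fun b hb => h b (List.mem_cons_of_mem a hb)]
      · have hp : pred a = false := by
          cases hpa : pred a
          · rfl
          · exact absurd (h a List.mem_cons_self hpa) hk
        simp only [Bool.not_eq_true] at hk
        simp [hk, hp, ih fun b hb => h b (List.mem_cons_of_mem a hb)]

theorem pv_scanA_eq (t pre : String) (l : List String) :
    pvScanA t pre l =
      (l.find? fun s => PySem.Str.endswith t s).map fun s => (true, pre ++ PySem.Str.strip s) := by
  induction l with
  | nil => rfl
  | cons s l ih =>
      cases h : PySem.Str.endswith t s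
      · simp only [pvScanA, List.find?_cons, h, Bool.false_eq_true, if_false, ih]
      · simp only [pvScanA, List.find?_cons, h, if_true, Option.map_some]

theorem pv_loopB_eq (t : String) (l : List (String × String)) :
    pvLoopB t l =
      ((l.find? fun q => PySem.Str.endswith t (" " ++ q.1)).map
        (fun q => ((true : Bool), q.2))).getD (false, "complete") := by
  induction l with
  | nil => rfl
  | cons q l ih =>
      cases h : PySem.Str.endswith t (" " ++ q.1)
      · simp only [pvLoopB, List.find?_cons, h, Bool.false_eq_true, if_false, ih]
      · simp only [pvLoopB, List.find?_cons, h, if_true, Option.map_some, Option.getD_some]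

-- B's two branches, unfolded
theorem pv_B_none (text : String)
    (h : (PySem.Str.split₀ (PySem.Str.lower (PySem.Str.strip text))).getLast? = none) :
    check_obvious_incomplete_py_alt text = (false, "complete") := by
  simp only [check_obvious_incomplete_py_alt]
  rw [h]

theorem pv_B_some (text w : String)
    (h : (PySem.Str.split₀ (PySem.Str.lower (PySem.Str.strip text))).getLast? = some w) :
    check_obvious_incomplete_py_alt text =
      pvLoopB (PySem.Str.lower (PySem.Str.strip text)) (pvIndexB.getD w []) := by
  simp only [check_obvious_incomplete_py_alt]
  rw [h]

-- A reduced to one find? over the flattened labelled table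
theorem pv_A_eq (text : String) :
    check_obvious_incomplete_py text =
      ((pvTableA.find? fun p =>
          PySem.Str.endswith (PySem.Str.lower (PySem.Str.strip text)) p.1).map
        (fun p => ((true : Bool), p.2))).getD (false, "complete") := by
  simp only [check_obvious_incomplete_py, pvTableA]
  rw [pv_scanA_eq, pv_scanA_eq, pv_scanA_eq, List.find?_append, List.find?_append,
    List.find?_map, List.find?_map, List.find?_map]
  have hcomp : ∀ pre : String,
      ((fun p : String × String => PySem.Str.endswith (PySem.Str.lower (PySem.Str.strip text)) p.1) ∘
        (fun s => (s, pre ++ PySem.Str.strip s))) =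
      (fun s => PySem.Str.endswith (PySem.Str.lower (PySem.Str.strip text)) s) := fun _ => rfl
  rw [hcomp, hcomp, hcomp]
  generalize List.find? (fun s => PySem.Str.endswith (PySem.Str.lower (PySem.Str.strip text)) s) pvEndings = a
  generalize List.find? (fun s => PySem.Str.endswith (PySem.Str.lower (PySem.Str.strip text)) s) pvConjunctions = b
  generalize List.find? (fun s => PySem.Str.endswith (PySem.Str.lower (PySem.Str.strip text)) s) pvTechnical = c
  cases a <;> cases b <;> cases c <;> rfl

-- an absent key yields the empty bucket
theorem pv_bucket_none (w : String) (hw : w ∉ pvKeys) : pvIndexB.getD w [] = [] := by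
  rw [PySem.Dict.getD_eq_get?_getD,
    (PySem.Dict.get?_eq_none_iff_not_mem_keys _ _).2 (by rw [pv_index_keys]; exact hw)]
  rfl

-- ===== VERDICT (by name: the statement is the Claim_ definition above) =====
theorem check_obvious_incomplete_py_spec : Claim_equal_check_obvious_incomplete_py := by
  intro text _
  unfold Spec_check_obvious_incomplete_py
  cases hlast : (PySem.Str.split₀ (PySem.Str.lower (PySem.Str.strip text))).getLast? with
  | none =>
      rw [pv_A_eq, pv_B_none text hlast]
      have hnone : (pvTableA.find? fun p =>
          PySem.Str.endswith (PySem.Str.lower (PySem.Str.strip text)) p.1) = none := by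
        apply List.find?_eq_none.2
        intro p hp hpred
        obtain ⟨hh, hne⟩ := pv_table_fact p hp
        have hl : (PySem.Str.split₀ p.1).getLast? = none :=
          (pv_last_eq _ p.1 hh hne hpred).symm.trans hlast
        have hp1 : PySem.Str.split₀ p.1 ≠ [] := by
          simp only [PySem.Str.split₀, ne_eq, List.map_eq_nil_iff]
          exact hne
        rw [List.getLast?_eq_none_iff] at hl
        exact hp1 hl
      rw [hnone]
      rfl
  | some w =>
      rw [pv_A_eq, pv_B_some text w hlast]
      have hkeep : ∀ p ∈ pvTableA,
          (fun p => PySem.Str.endswith (PySem.Str.lower (PySem.Str.strip text)) p.1) p = true →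
          (fun p => pvKey p.1 == w) p = true := by
        intro p hp hpred
        obtain ⟨hh, hne⟩ := pv_table_fact p hp
        have hl : (PySem.Str.split₀ p.1).getLast? = some w :=
          (pv_last_eq _ p.1 hh hne hpred).symm.trans hlast
        simp [pvKey, hl]
      rw [pv_find?_filter pvTableA _ (fun p => pvKey p.1 == w) hkeep, pv_loopB_eq]
      by_cases hw : w ∈ pvKeys
      · rw [← pv_bucket w hw, List.find?_map]
        have hcmp : ((fun p : String × String =>
              PySem.Str.endswith (PySem.Str.lower (PySem.Str.strip text)) p.1) ∘
            (fun q : String × String => ((" " ++ q.1 : String), q.2))) =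
            (fun q : String × String =>
              PySem.Str.endswith (PySem.Str.lower (PySem.Str.strip text)) (" " ++ q.1)) := rfl
        rw [hcmp]
        cases (pvIndexB.getD w []).find?
            fun q => PySem.Str.endswith (PySem.Str.lower (PySem.Str.strip text)) (" " ++ q.1) <;> rfl
      · have hfil : pvTableA.filter (fun p => pvKey p.1 == w) = [] := by
          apply List.filter_eq_nil_iff.2
          intro p hp
          have := pv_keys_fact p hp
          simp only [beq_iff_eq]
          intro he
          exact hw (he ▸ this)
        rw [hfil, pv_bucket_none w hw]
        rfl
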